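-- pv_equiv track=rewrite | github.com/AneraSS/pynative.com | 7 List Excercise/Excercise 2_zip.py | ConcatenateTwoLists_ChatGPT
-- ===== SOURCE A (Python) =====
-- def ConcatenateTwoLists_ChatGPT(list1: list[str], list2: list[str]) -> list [str]:
--     result = []
--     for i in range(max(len(list1), len(list2))):
--         if i < len(list1) and i < len(list2):
--             result.append(list1[i] + list2[i])
--         elif i < len(list1):
--             result.append(list1[i])
--         elif i < len(list2):
--             result.append(list2[i])
--     return result
-- ===== SOURCE B (Python) =====
-- def ConcatenateTwoLists_ChatGPT(list1: list[str], list2: list[str]) -> list[str]: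
--     n = min(len(list1), len(list2))
--     result = [a + b for a, b in zip(list1, list2)]
--     if len(list1) > len(list2):
--         result += list1[n:]
--     elif len(list2) > len(list1):
--         result += list2[n:]
--     return result
-- ===== Notes on version B (the rewrite author's own statement) =====
-- stated objective: simpler
-- what changed: Replaces the per-index loop with three-way bounds branching by a zip comprehension over the common prefix plus one bulk slice-append of the longer list's tail.
import Mathlib
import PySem

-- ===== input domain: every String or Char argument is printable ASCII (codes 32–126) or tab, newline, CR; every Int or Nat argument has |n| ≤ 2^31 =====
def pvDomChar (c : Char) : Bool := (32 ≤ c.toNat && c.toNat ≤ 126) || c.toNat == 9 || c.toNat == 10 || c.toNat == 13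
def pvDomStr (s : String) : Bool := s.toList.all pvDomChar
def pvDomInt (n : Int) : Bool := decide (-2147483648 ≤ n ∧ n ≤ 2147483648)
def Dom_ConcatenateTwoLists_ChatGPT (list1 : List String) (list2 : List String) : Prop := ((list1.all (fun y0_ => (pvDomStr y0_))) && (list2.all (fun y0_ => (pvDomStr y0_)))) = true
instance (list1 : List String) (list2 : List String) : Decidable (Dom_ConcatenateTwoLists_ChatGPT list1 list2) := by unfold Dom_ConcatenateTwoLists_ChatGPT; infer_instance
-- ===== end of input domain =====

-- B replaces A's per-index loop (with a three-way bounds branch at every index) by a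
-- zipWith over the common prefix plus one bulk slice-append of the longer list's tail
-- (objective: simpler).

-- ===== PORT A =====
def ConcatenateTwoLists_ChatGPT (list1 : List String) (list2 : List String) : List String :=
  (PySem.List.pyRange 0 (max (list1.length : Int) (list2.length : Int)) 1).foldl
    (fun result i =>
      if i < (list1.length : Int) ∧ i < (list2.length : Int) then
        result ++ [PySem.List.pyGetD list1 i "" ++ PySem.List.pyGetD list2 i ""]
      else if i < (list1.length : Int) then
        result ++ [PySem.List.pyGetD list1 i ""]
      else if i < (list2.length : Int) then
        result ++ [PySem.List.pyGetD list2 i ""]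
      else result) []

-- ===== PORT B =====
def ConcatenateTwoLists_ChatGPT_alt (list1 : List String) (list2 : List String) : List String :=
  let n : Int := min (list1.length : Int) (list2.length : Int)
  let result := List.zipWith (· ++ ·) list1 list2
  if (list1.length : Int) > (list2.length : Int) then
    result ++ PySem.List.slice list1 (some n) none
  else if (list2.length : Int) > (list1.length : Int) then
    result ++ PySem.List.slice list2 (some n) none
  else result

-- ===== PRECONDITION & SPEC =====
def Spec_ConcatenateTwoLists_ChatGPT (list1 : List String) (list2 : List String) (out : List String) : Prop := out = ConcatenateTwoLists_ChatGPT_alt list1 list2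
instance (list1 : List String) (list2 : List String) (out : List String) : Decidable (Spec_ConcatenateTwoLists_ChatGPT list1 list2 out) := by unfold Spec_ConcatenateTwoLists_ChatGPT; infer_instance

-- ===== CLAIM (what is proved, stated in full; the proofs are below) =====
def Claim_equal_ConcatenateTwoLists_ChatGPT : Prop := ∀ (list1 : List String) (list2 : List String), Dom_ConcatenateTwoLists_ChatGPT list1 list2 → Spec_ConcatenateTwoLists_ChatGPT list1 list2 (ConcatenateTwoLists_ChatGPT list1 list2)

-- ===== LEMMAS AND PROOFS =====

-- A's loop appends exactly one element per index of range(max), so A is a map over that range.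
lemma A_eq_map (l1 l2 : List String) :
    ConcatenateTwoLists_ChatGPT l1 l2 =
      (List.range (max l1.length l2.length)).map (fun k =>
        if k < l1.length ∧ k < l2.length then l1.getD k "" ++ l2.getD k ""
        else if k < l1.length then l1.getD k ""
        else l2.getD k "") := by
  unfold ConcatenateTwoLists_ChatGPT
  refine Eq.trans (PySem.List.foldl_congr_mem _ _
      (fun (result : List String) (i : Int) =>
        result ++ [if i < (l1.length : Int) ∧ i < (l2.length : Int) then
            PySem.List.pyGetD l1 i "" ++ PySem.List.pyGetD l2 i ""
          else if i < (l1.length : Int) then PySem.List.pyGetD l1 i ""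
          else PySem.List.pyGetD l2 i ""]) _ ?_) ?_
  · intro acc i hi
    rw [PySem.List.mem_pyRange_one] at hi
    by_cases h1 : i < (l1.length : Int) ∧ i < (l2.length : Int)
    · simp [h1]
    · by_cases h2 : i < (l1.length : Int)
      · have h3 : ¬ i < (l2.length : Int) := by omega
        simp [h2, h3]
      · have h3 : i < (l2.length : Int) := by omega
        simp [h2, h3]
  rw [PySem.List.foldl_append_singleton_eq_map, PySem.List.pyRange_one]
  simp only [List.nil_append, List.map_map]
  have hmax : ((max (l1.length : Int) (l2.length : Int)) - 0).toNat = max l1.length l2.length := by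
    omega
  rw [hmax]
  refine List.map_congr_left ?_
  intro k hk
  simp only [Function.comp, zero_add, PySem.List.pyGetD_natCast]
  split_ifs with h1 h2 h3 h4 h5 <;> first | rfl | omega

-- B's value, with the slice unfolded to a drop of the longer list.
lemma B_eq (l1 l2 : List String) :
    ConcatenateTwoLists_ChatGPT_alt l1 l2 =
      if l2.length < l1.length then List.zipWith (· ++ ·) l1 l2 ++ l1.drop (min l1.length l2.length)
      else if l1.length < l2.length then List.zipWith (· ++ ·) l1 l2 ++ l2.drop (min l1.length l2.length)
      else List.zipWith (· ++ ·) l1 l2 := by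
  unfold ConcatenateTwoLists_ChatGPT_alt
  have hmin : (min (l1.length : Int) (l2.length : Int)) = ((min l1.length l2.length : Nat) : Int) := by
    omega
  simp only [hmin, PySem.List.slice_from_natCast, gt_iff_lt, Nat.cast_lt]

-- ===== VERDICT (by name: the statement is the Claim_ definition above) =====
theorem ConcatenateTwoLists_ChatGPT_spec : Claim_equal_ConcatenateTwoLists_ChatGPT := by
  intro l1 l2 _
  show ConcatenateTwoLists_ChatGPT l1 l2 = ConcatenateTwoLists_ChatGPT_alt l1 l2
  rw [A_eq_map, B_eq]
  have hz : (List.zipWith (· ++ ·) l1 l2).length = min l1.length l2.length := by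
    simp [List.length_zipWith]
  split_ifs with h1 h2
  · apply List.ext_getElem
    · simp [List.length_zipWith]; omega
    · intro i hi hi'
      rw [List.length_map, List.length_range] at hi
      simp only [List.length_zipWith] at hi'
      simp only [List.getElem_map, List.getElem_range]
      by_cases hlt : i < min l1.length l2.length
      · rw [List.getElem_append_left (by omega)]
        simp only [List.getElem_zipWith]
        rw [if_pos (by omega), List.getD_eq_getElem l1 "" (by omega),
          List.getD_eq_getElem l2 "" (by omega)]
      · rw [List.getElem_append_right (by omega)]
        rw [if_neg (by omega), if_pos (by omega)]
        rw [List.getElem_drop, List.getD_eq_getElem l1 "" (by omega)]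
        congr 1; omega
  · apply List.ext_getElem
    · simp [List.length_zipWith]; omega
    · intro i hi hi'
      rw [List.length_map, List.length_range] at hi
      simp only [List.length_zipWith] at hi'
      simp only [List.getElem_map, List.getElem_range]
      by_cases hlt : i < min l1.length l2.length
      · rw [List.getElem_append_left (by omega)]
        simp only [List.getElem_zipWith]
        rw [if_pos (by omega), List.getD_eq_getElem l1 "" (by omega),
          List.getD_eq_getElem l2 "" (by omega)]
      · rw [List.getElem_append_right (by omega)]
        rw [if_neg (by omega), if_neg (by omega)]
        rw [List.getElem_drop, List.getD_eq_getElem l2 "" (by omega)]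
        congr 1; omega
  · apply List.ext_getElem
    · simp [List.length_zipWith]; omega
    · intro i hi hi'
      rw [List.length_map, List.length_range] at hi
      simp only [List.length_zipWith] at hi'
      simp only [List.getElem_map, List.getElem_range]
      rw [if_pos (by simp at hi'; omega)]
      simp only [List.getElem_zipWith]
      rw [List.getD_eq_getElem l1 "" (by omega), List.getD_eq_getElem l2 "" (by omega)]
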